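-- pv_equiv track=rewrite | github.com/JimmyCHWang/mcr-common-fan-list | hand_generate.py | twist_string
-- ===== SOURCE A (Python) =====
-- def twist_string(input_string):
--     result = []
--     s = ""
--
--     for char in input_string:
--         if char.isdigit():
--             s += char
--         elif char.isalpha():
--             for digit in s:
--                 result.append(digit + char)
--             s = ""
--
--     return ''.join(result)
-- ===== SOURCE B (Python) =====
-- def twist_string(input_string):
--     pairs = []
--     current_letter = None
--     for ch in reversed(input_string):
--         if ch.isalpha():
--             current_letter = ch
--         elif ch.isdigit() and current_letter is not None:
--             pairs.append(ch + current_letter)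
--     pairs.reverse()
--     return ''.join(pairs)
-- ===== Notes on version B (the rewrite author's own statement) =====
-- stated objective: alternative
-- what changed: Replaces the digit buffer flushed at each letter by a single right-to-left pass that keeps only the nearest letter seen so far and pairs each digit with it, reversing the collected pairs at the end.
import Mathlib
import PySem

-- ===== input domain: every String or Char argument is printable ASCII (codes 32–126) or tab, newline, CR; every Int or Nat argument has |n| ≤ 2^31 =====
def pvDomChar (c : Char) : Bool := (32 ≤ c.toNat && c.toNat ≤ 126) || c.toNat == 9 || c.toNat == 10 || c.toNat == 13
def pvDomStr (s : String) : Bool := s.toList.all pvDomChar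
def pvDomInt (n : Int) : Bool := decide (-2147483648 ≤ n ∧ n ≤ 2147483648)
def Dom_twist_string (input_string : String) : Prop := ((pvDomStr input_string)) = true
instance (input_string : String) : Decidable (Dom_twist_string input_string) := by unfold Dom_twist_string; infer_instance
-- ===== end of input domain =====

-- B replaces A's digit buffer (flushed at each letter) by a single right-to-left pass
-- keeping only the nearest letter seen so far; same O(n) cost, different traversal.


-- ===== PORT A =====
-- state: (result : list of pair-strings as char lists, s : buffered digit chars)
def twistStepA (st : List (List Char) × List Char) (c : Char) : List (List Char) × List Char :=
  if PySem.Chars.isdigit c then (st.1, st.2 ++ [c])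
  else if PySem.Chars.isalpha c then (st.1 ++ st.2.map (fun d => [d, c]), [])
  else st

def twist_string (input_string : String) : String :=
  let st := input_string.toList.foldl twistStepA ([], [])
  String.ofList (PySem.Chars.join [] st.1)

-- ===== PORT B =====
-- state: (current_letter, pairs collected while scanning from the right)
def twistStepB (st : Option Char × List (List Char)) (c : Char) : Option Char × List (List Char) :=
  if PySem.Chars.isalpha c then (some c, st.2)
  else if PySem.Chars.isdigit c then
    match st.1 with
    | some L => (st.1, st.2 ++ [[c, L]])
    | none => st
  else st

def twist_string_alt (input_string : String) : String :=
  let st := input_string.toList.reverse.foldl twistStepB (none, [])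
  String.ofList (PySem.Chars.join [] st.2.reverse)

-- ===== PRECONDITION & SPEC =====
def Spec_twist_string (input_string : String) (out : String) : Prop := out = twist_string_alt input_string
instance (input_string : String) (out : String) : Decidable (Spec_twist_string input_string out) := by unfold Spec_twist_string; infer_instance

-- ===== CLAIM (what is proved, stated in full; the proofs are below) =====
def Claim_equal_twist_string : Prop := ∀ (input_string : String), Dom_twist_string input_string → Spec_twist_string input_string (twist_string input_string)

-- ===== LEMMAS AND PROOFS =====

-- A's loop, without the result accumulator
def aRun (buf : List Char) : List Char → List (List Char)
  | [] => []
  | c :: cs =>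
    if PySem.Chars.isdigit c then aRun (buf ++ [c]) cs
    else if PySem.Chars.isalpha c then buf.map (fun d => [d, c]) ++ aRun [] cs
    else aRun buf cs

-- first alphabetic character of the list
def firstL : List Char → Option Char
  | [] => none
  | c :: cs => if PySem.Chars.isalpha c then some c else firstL cs

theorem isdigit_not_isalpha (c : Char) (h : PySem.Chars.isdigit c = true) :
    PySem.Chars.isalpha c = false := by
  unfold PySem.Chars.isdigit at h
  unfold PySem.Chars.isalpha PySem.Chars.isupper PySem.Chars.islower
  simp only [Bool.and_eq_true, decide_eq_true_eq, Char.le_def, UInt32.le_iff_toNat_le,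
    Bool.or_eq_false_iff, Bool.and_eq_false_iff, decide_eq_false_iff_not, not_le,
    show ('0':Char).val.toNat = 48 from rfl, show ('9':Char).val.toNat = 57 from rfl,
    show ('A':Char).val.toNat = 65 from rfl, show ('Z':Char).val.toNat = 90 from rfl,
    show ('a':Char).val.toNat = 97 from rfl, show ('z':Char).val.toNat = 122 from rfl] at *
  omega

theorem isalpha_not_isdigit (c : Char) (h : PySem.Chars.isalpha c = true) :
    PySem.Chars.isdigit c = false := by
  cases hd : PySem.Chars.isdigit c
  · rfl
  · rw [isdigit_not_isalpha c hd] at h; exact absurd h (by simp)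

theorem foldlA_eq_aRun (cs : List Char) : ∀ res buf,
    (cs.foldl twistStepA (res, buf)).1 = res ++ aRun buf cs := by
  induction cs with
  | nil => intro res buf; simp [aRun]
  | cons c cs ih =>
    intro res buf
    simp only [List.foldl_cons, twistStepA, aRun]
    split_ifs with h1 h2
    · exact ih res (buf ++ [c])
    · rw [ih]; simp
    · exact ih res buf

theorem aRun_buf (cs : List Char) : ∀ buf,
    aRun buf cs =
      (match firstL cs with
       | some L => buf.map (fun d => [d, L])
       | none => []) ++ aRun [] cs := by
  induction cs with
  | nil => intro buf; simp [aRun, firstL]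
  | cons c cs ih =>
    intro buf
    by_cases h1 : PySem.Chars.isdigit c = true
    · have h2 := isdigit_not_isalpha c h1
      simp only [aRun, firstL, h1, h2, if_true, Bool.false_eq_true]
      rw [ih (buf ++ [c]), List.nil_append, ih [c]]
      cases firstL cs <;> simp
    · by_cases h2 : PySem.Chars.isalpha c = true
      · simp [aRun, firstL, h1, h2]
      · simp only [aRun, firstL, h1, h2]
        exact ih buf

theorem foldrB_eq (cs : List Char) :
    cs.foldr (fun c st => twistStepB st c) (none, []) =
      (firstL cs, (aRun [] cs).reverse) := by
  induction cs with
  | nil => simp [aRun, firstL]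
  | cons c cs ih =>
    rw [List.foldr_cons, ih]
    by_cases h1 : PySem.Chars.isalpha c = true
    · have hd := isalpha_not_isdigit c h1
      simp [twistStepB, aRun, firstL, h1, hd]
    · by_cases h2 : PySem.Chars.isdigit c = true
      · have hA : aRun ([] : List Char) (c :: cs) = aRun [c] cs := by
          simp [aRun, h2]
        cases hf : firstL cs with
        | none =>
          simp [twistStepB, firstL, h1, h2, hf, hA, aRun_buf cs [c]]
        | some L =>
          simp [twistStepB, firstL, h1, h2, hf, hA, aRun_buf cs [c]]
      · simp [twistStepB, aRun, firstL, h1, h2]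

-- ===== VERDICT (by name: the statement is the Claim_ definition above) =====
theorem twist_string_spec : Claim_equal_twist_string := by
  intro s _
  unfold Spec_twist_string twist_string twist_string_alt
  rw [List.foldl_reverse]
  have hB := foldrB_eq s.toList
  simp only [hB, foldlA_eq_aRun s.toList [] [], List.nil_append, List.reverse_reverse]
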